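-- pv_equiv track=rewrite | github.com/eliavw/mercs-v5 | src/mercs/utils/utils.py | codes_to_query
-- ===== SOURCE A (Python) =====
-- def codes_to_query(codes, atts=None):
--     """
--     Change the codes-array to an actual queries, which are three arrays.
--
--     :param code:                Array that contains: 0-desc/1-target/-1-missing code for each attribute
--     :param atts:                Array that contains the attributes (indices)
--     :return: Three arrays.      One for desc atts indices, one for targets, one for missing
--     """
--
--     if atts is None:
--         atts = list(range(len(codes[0])))
--     nb_codes = len(codes)
--
--     desc, targ, miss = [], [], []
--
--     for c_idx in range(nb_codes):
--         c_desc, c_targ, c_miss = code_to_query(codes[c_idx], atts)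
--
--         desc.append(c_desc)
--         targ.append(c_targ)
--         miss.append(c_miss)
--
--     return desc, targ, miss
--
-- def code_to_query(code, atts=None):
--     """
--     Change the code-array to an actual queries, which are three arrays.
--
--     :param code:                Array that contains:
--                                      0 for desc attribute
--                                      1 for target attribute
--                                     -1 for missing attribute
--     :param atts:                Array that contains the attributes (indices)
--     :return: Three arrays.      One for desc atts indices, one for targets,
--                                 one for missing
--     """
--
--     if atts is None:
--         atts = list(range(len(code)))
--     assert len(code) == len(atts)
--
--     desc = [x for i, x in enumerate(atts)
--             if code[i] == encode_attribute(x,[x],[])]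
--     targ = [x for i, x in enumerate(atts)
--             if code[i] == encode_attribute(x,[],[x])]
--     miss = [x for i, x in enumerate(atts)
--             if code[i] == encode_attribute(x, [], [])]
--     return desc, targ, miss
--
-- def encode_attribute(att, desc, targ):
--     """
--     Encode the 'role' of an attribute in a model.
--
--     `Role` means:
--         - Descriptive attribute (input)
--         - Target attribute (output)
--         - Missing attribute (not relevant to the model)
--     """
--
--     check_desc = att in desc
--     check_targ = att in targ
--
--     code_int = check_targ * 2 + check_desc - 1
--
--     return code_int
-- ===== SOURCE B (Python) =====
-- def codes_to_query(codes, atts=None):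
--     if atts is None:
--         atts = list(range(len(codes[0])))
--     desc, targ, miss = [], [], []
--     for code in codes:
--         assert len(code) == len(atts)
--         d, t, m = [], [], []
--         for c, x in zip(code, atts):
--             if c == 0:
--                 d.append(x)
--             elif c == 1:
--                 t.append(x)
--             elif c == -1:
--                 m.append(x)
--         desc.append(d)
--         targ.append(t)
--         miss.append(m)
--     return desc, targ, miss
-- ===== Notes on version B (the rewrite author's own statement) =====
-- stated objective: simpler
-- what changed: Inlined the encode_attribute/code_to_query helpers and replaced the three scanning enumerate-comprehensions per code with a single zip pass that dispatches each attribute on its code value (0/1/-1, others dropped).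
import Mathlib
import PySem

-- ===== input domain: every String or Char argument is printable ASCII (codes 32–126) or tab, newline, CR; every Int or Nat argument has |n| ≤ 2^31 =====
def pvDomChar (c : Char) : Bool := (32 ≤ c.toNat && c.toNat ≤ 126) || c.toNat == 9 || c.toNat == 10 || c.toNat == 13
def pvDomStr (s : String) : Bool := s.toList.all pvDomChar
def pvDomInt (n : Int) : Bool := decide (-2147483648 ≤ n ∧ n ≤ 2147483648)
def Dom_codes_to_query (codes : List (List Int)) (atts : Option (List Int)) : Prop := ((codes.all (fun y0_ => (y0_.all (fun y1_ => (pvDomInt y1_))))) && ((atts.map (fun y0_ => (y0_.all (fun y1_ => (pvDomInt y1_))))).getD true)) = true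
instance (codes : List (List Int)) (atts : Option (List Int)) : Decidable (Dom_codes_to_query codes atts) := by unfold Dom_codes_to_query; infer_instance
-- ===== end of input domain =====

-- B inlines the helpers and replaces A's three enumerate-scans per code with one zip pass dispatching on the code value (simpler).
-- ===== PORT A =====
-- encode_attribute(att, desc, targ): (att in targ)*2 + (att in desc) - 1
def ctq_encode (att : Int) (desc targ : List Int) : Int :=
  (if att ∈ targ then (1 : Int) else 0) * 2 + (if att ∈ desc then (1 : Int) else 0) - 1

-- code_to_query(code, atts) with atts always supplied by the caller: three enumerate-comprehensions
def ctq_code_to_query (code atts : List Int) : List Int × List Int × List Int :=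
  (((PySem.List.enumerate atts).filter
      (fun p => (PySem.List.pyGetD code p.1 0) == ctq_encode p.2 [p.2] [])).map (·.2),
   ((PySem.List.enumerate atts).filter
      (fun p => (PySem.List.pyGetD code p.1 0) == ctq_encode p.2 [] [p.2])).map (·.2),
   ((PySem.List.enumerate atts).filter
      (fun p => (PySem.List.pyGetD code p.1 0) == ctq_encode p.2 [] [])).map (·.2))

def codes_to_query (codes : List (List Int)) (atts : Option (List Int)) : List (List Int) × List (List Int) × List (List Int) :=
  let atts := match atts with
    | none => PySem.List.pyRange 0 ((PySem.List.pyGetD codes 0 []).length : Int) 1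
    | some l => l
  (PySem.List.pyRange 0 (codes.length : Int) 1).foldl
    (fun acc c_idx =>
      let q := ctq_code_to_query (PySem.List.pyGetD codes c_idx []) atts
      (acc.1 ++ [q.1], acc.2.1 ++ [q.2.1], acc.2.2 ++ [q.2.2]))
    ([], [], [])

-- ===== PORT B =====
-- one zip pass per code, dispatching on the code value; out-of-range values fall through
def ctq_split (code atts : List Int) : List Int × List Int × List Int :=
  (code.zip atts).foldl
    (fun acc p =>
      if p.1 = 0 then (acc.1 ++ [p.2], acc.2.1, acc.2.2)
      else if p.1 = 1 then (acc.1, acc.2.1 ++ [p.2], acc.2.2)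
      else if p.1 = -1 then (acc.1, acc.2.1, acc.2.2 ++ [p.2])
      else acc)
    ([], [], [])

def ctq_loop (codes : List (List Int)) (atts : List Int) : List (List Int) × List (List Int) × List (List Int) :=
  match codes with
  | [] => ([], [], [])
  | code :: rest =>
    let q := ctq_split code atts
    let r := ctq_loop rest atts
    (q.1 :: r.1, q.2.1 :: r.2.1, q.2.2 :: r.2.2)

def codes_to_query_alt (codes : List (List Int)) (atts : Option (List Int)) : List (List Int) × List (List Int) × List (List Int) :=
  let atts := match atts with
    | none => PySem.List.pyRange 0 ((PySem.List.pyGetD codes 0 []).length : Int) 1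
    | some l => l
  ctq_loop codes atts

-- ===== PRECONDITION & SPEC =====
-- Pre_ excludes exactly where A raises: an empty codes list when atts is defaulted (IndexError),
-- and any code whose length differs from the attribute list's (AssertionError).
def Pre_codes_to_query (codes : List (List Int)) (atts : Option (List Int)) : Prop :=
  (atts = none → codes ≠ []) ∧ ∀ c ∈ codes, c.length = (atts.getD (codes.headD [])).length
instance (codes : List (List Int)) (atts : Option (List Int)) : Decidable (Pre_codes_to_query codes atts) := by unfold Pre_codes_to_query; infer_instance

def pvWitness_codes_to_query : List (List Int) × Option (List Int) := ([[0, 1, -1], [1, 1, 0]], none)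

def Spec_codes_to_query (codes : List (List Int)) (atts : Option (List Int)) (out : List (List Int) × List (List Int) × List (List Int)) : Prop := out = codes_to_query_alt codes atts
instance (codes : List (List Int)) (atts : Option (List Int)) (out : List (List Int) × List (List Int) × List (List Int)) : Decidable (Spec_codes_to_query codes atts out) := by unfold Spec_codes_to_query; infer_instance

-- ===== CLAIM (what is proved, stated in full; the proofs are below) =====
def Claim_equal_codes_to_query : Prop := ∀ (codes : List (List Int)) (atts : Option (List Int)), Dom_codes_to_query codes atts → Pre_codes_to_query codes atts → Spec_codes_to_query codes atts (codes_to_query codes atts)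

-- ===== LEMMAS AND PROOFS =====

-- A's comprehension  [x for i, x in enumerate(atts) if code[i] == v]  as a zip-filterMap,
-- for a code seen behind a prefix `front` fixing the enumerate start index.
theorem ctq_comp_eq_filterMap (v : Int) :
    ∀ (atts front code : List Int), code.length = atts.length →
    ((PySem.List.enumerate atts (front.length : Int)).filter
        (fun p => (PySem.List.pyGetD (front ++ code) p.1 0) == v)).map (·.2)
      = (code.zip atts).filterMap (fun p => if p.1 = v then some p.2 else none) := by
  intro atts
  induction atts with
  | nil => intro front code h; simp at h; simp [h, PySem.List.enumerate_nil]
  | cons a as ih =>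
    intro front code h
    match code with
    | [] => simp at h
    | c :: cs =>
      simp only [List.length_cons] at h
      have hget : PySem.List.pyGetD (front ++ c :: cs) ((front.length : Int)) 0 = c := by
        rw [PySem.List.pyGetD_natCast]
        simp [List.getD]
      have hstep : (front ++ [c]).length = front.length + 1 := by simp
      have ihx := ih (front ++ [c]) cs (by omega)
      rw [hstep] at ihx
      push_cast at ihx
      rw [PySem.List.enumerate_cons]
      rw [List.append_assoc] at ihx
      simp only [List.singleton_append] at ihx
      simp only [List.zip_cons_cons, List.filterMap_cons, List.filter_cons, hget]
      by_cases hc : c = v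
      · subst hc; simp [ihx]
      · simp [hc, ihx]

-- A's per-code helper equals B's single zip pass (lengths equal).
theorem ctq_split_acc :
    ∀ (l : List (Int × Int)) (d t m : List Int),
    l.foldl
      (fun acc p =>
        if p.1 = 0 then (acc.1 ++ [p.2], acc.2.1, acc.2.2)
        else if p.1 = 1 then (acc.1, acc.2.1 ++ [p.2], acc.2.2)
        else if p.1 = -1 then (acc.1, acc.2.1, acc.2.2 ++ [p.2])
        else acc)
      (d, t, m)
      = (d ++ l.filterMap (fun p => if p.1 = 0 then some p.2 else none),
         t ++ l.filterMap (fun p => if p.1 = 1 then some p.2 else none),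
         m ++ l.filterMap (fun p => if p.1 = -1 then some p.2 else none)) := by
  intro l
  induction l with
  | nil => intro d t m; simp
  | cons p ps ih =>
    intro d t m
    simp only [List.foldl_cons, List.filterMap_cons]
    by_cases h0 : p.1 = 0
    · simp [h0, ih]
    · by_cases h1 : p.1 = 1
      · simp [h1, ih]
      · by_cases h2 : p.1 = -1
        · simp [h2, ih]
        · simp [h0, h1, h2, ih]

theorem ctq_helper_eq (code atts : List Int) (h : code.length = atts.length) :
    ctq_code_to_query code atts = ctq_split code atts := by
  have e0 := ctq_comp_eq_filterMap 0 atts [] code h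
  have e1 := ctq_comp_eq_filterMap 1 atts [] code h
  have e2 := ctq_comp_eq_filterMap (-1) atts [] code h
  simp only [List.length_nil, Nat.cast_zero, List.nil_append] at e0 e1 e2
  unfold ctq_code_to_query ctq_split
  rw [ctq_split_acc]
  have henc0 : ∀ x : Int, ctq_encode x [x] [] = 0 := by intro x; simp [ctq_encode]
  have henc1 : ∀ x : Int, ctq_encode x [] [x] = 1 := by intro x; simp [ctq_encode]
  have henc2 : ∀ x : Int, ctq_encode x [] [] = -1 := by intro x; simp [ctq_encode]
  simp only [henc0, henc1, henc2, List.nil_append] at *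
  exact Prod.ext (by rw [← e0]) (Prod.ext (by rw [← e1]) (by rw [← e2]))

-- A's indexed outer fold equals B's structural loop, given every code has len(atts).
theorem ctq_fold_eq_loop (atts : List Int) :
    ∀ (codes : List (List Int)) (d t m : List (List Int)),
    (∀ c ∈ codes, c.length = atts.length) →
    codes.foldl
      (fun acc code =>
        let q := ctq_code_to_query code atts
        (acc.1 ++ [q.1], acc.2.1 ++ [q.2.1], acc.2.2 ++ [q.2.2]))
      (d, t, m)
      = (d ++ (ctq_loop codes atts).1, t ++ (ctq_loop codes atts).2.1, m ++ (ctq_loop codes atts).2.2) := by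
  intro codes
  induction codes with
  | nil => intro d t m _; simp [ctq_loop]
  | cons code rest ih =>
    intro d t m hlen
    have hc : code.length = atts.length := hlen code (by simp)
    simp only [List.foldl_cons]
    rw [ih _ _ _ (fun c hc' => hlen c (by simp [hc']))]
    simp [ctq_loop, ctq_helper_eq code atts hc]

-- ===== VERDICT (by name: the statement is the Claim_ definition above) =====
theorem codes_to_query_spec : Claim_equal_codes_to_query := by
  intro codes atts _hdom hpre
  unfold Spec_codes_to_query codes_to_query codes_to_query_alt
  have hfold :
      ∀ (attsR : List Int), (∀ c ∈ codes, c.length = attsR.length) →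
      (PySem.List.pyRange 0 (codes.length : Int) 1).foldl
        (fun acc c_idx =>
          let q := ctq_code_to_query (PySem.List.pyGetD codes c_idx []) attsR
          (acc.1 ++ [q.1], acc.2.1 ++ [q.2.1], acc.2.2 ++ [q.2.2]))
        ([], [], [])
        = ctq_loop codes attsR := by
    intro attsR hlen
    rw [PySem.List.foldl_pyRange_zero_pyGetD' codes []
      (fun acc code =>
        let q := ctq_code_to_query code attsR
        (acc.1 ++ [q.1], acc.2.1 ++ [q.2.1], acc.2.2 ++ [q.2.2])) ([], [], [])]
    simpa using ctq_fold_eq_loop attsR codes [] [] [] hlen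
  unfold Pre_codes_to_query at hpre
  obtain ⟨hne, hlen⟩ := hpre
  match atts with
  | none =>
    simp only [Option.getD_none] at hlen
    simp only
    apply hfold
    intro c hc
    rw [PySem.List.length_pyRange_one]
    have hh : PySem.List.pyGetD codes 0 [] = codes.headD [] := by
      match codes with
      | [] => exact absurd rfl (hne rfl)
      | x :: xs => simp [PySem.List.pyGetD_zero_cons]
    rw [hh]
    have := hlen c hc
    omega
  | some l =>
    simp only [Option.getD_some] at hlen
    simp only
    exact hfold l hlen
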